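-- pv_equiv track=rewrite | github.com/Shiv10/Codeforces-solutions | DP/gred-travller-memoization.py | gridtraveller
-- ===== SOURCE A (Python) =====
-- def gridtraveller(n,m, d = {}):
--     if (n,m) in d.keys():
--         return d[(n,m)]
--     if (m, n) in d.keys():
--         return d[(m,n)]
--     if n==0 or m == 0:
--         return 0
--     if n==1 and m ==1:
--         return 1
--
--     d[(n,m)] = gridtraveller(n-1,m)+gridtraveller(n,m-1)
--     return d[(n,m)]
-- ===== SOURCE B (Python) =====
-- def gridtraveller(n, m, d={}):
--     # Closed form: after the memo/base checks the recursive original always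
--     # computes the plain lattice-path count C(n+m-2, n-1) (its inner recursive
--     # calls use the default memo dict, never the caller's d, so entries of d
--     # other than (n,m)/(m,n) cannot influence the result).  Like the original,
--     # it stores the computed value under (n,m) in the caller's d.
--     if (n, m) in d:
--         return d[(n, m)]
--     if (m, n) in d:
--         return d[(m, n)]
--     if n == 0 or m == 0:
--         return 0
--     if n == 1 and m == 1:
--         return 1
--     v = 1
--     for i in range(1, n):
--         v = v * (m - 1 + i) // i      # exact: v stays C(m-1+i, i)
--     d[(n, m)] = v
--     return v
-- ===== Notes on version B (the rewrite author's own statement) =====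
-- stated objective: faster
-- what changed: Replaces the memoized two-branch recursion with the closed-form lattice-path count C(n+m-2, n-1) computed by a single exact-division product loop (A's inner recursive calls use its default memo dict, never the caller's d, so only a top-level hit on (n,m)/(m,n) can change the answer, which B checks the same way).
import Mathlib
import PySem

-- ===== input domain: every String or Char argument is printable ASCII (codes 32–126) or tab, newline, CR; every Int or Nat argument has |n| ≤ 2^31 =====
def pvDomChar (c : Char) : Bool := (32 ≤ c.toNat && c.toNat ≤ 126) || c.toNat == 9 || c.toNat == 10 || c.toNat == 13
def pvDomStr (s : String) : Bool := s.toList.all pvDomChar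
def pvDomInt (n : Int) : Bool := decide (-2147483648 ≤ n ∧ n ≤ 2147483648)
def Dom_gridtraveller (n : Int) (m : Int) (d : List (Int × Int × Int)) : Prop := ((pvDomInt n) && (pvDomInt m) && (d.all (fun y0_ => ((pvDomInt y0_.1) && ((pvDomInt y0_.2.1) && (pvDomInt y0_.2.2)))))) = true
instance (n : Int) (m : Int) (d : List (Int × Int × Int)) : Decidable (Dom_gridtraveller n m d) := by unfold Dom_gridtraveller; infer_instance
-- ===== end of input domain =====

-- ===== PORT A =====
-- B changes the core computation to a closed-form binomial product; equivalence is about the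
-- RETURN value (both Pythons also write the computed value to the caller's d under (n,m);
-- A additionally fills its private default memo dict, which B does not reproduce).

-- shared conversion induced by the type convention: the Python dict {(a,b): v} as a PySem.Dict
def gtDict (d : List (Int × Int × Int)) : PySem.Dict (Int × Int) Int :=
  PySem.Dict.ofList (d.map (fun t => ((t.1, t.2.1), t.2.2)))

-- A's recursive worker: the Python recursive calls `gridtraveller(n-1, m)` use the DEFAULT
-- memo dict (they never pass the caller's d), so the recursion threads that private dict;
-- fuel only makes the recursion total (Pre_ guarantees it never runs out).
def grecA : Nat → Int → Int → PySem.Dict (Int × Int) Int → Int × PySem.Dict (Int × Int) Int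
  | 0, _, _, dd => (0, dd)
  | fuel + 1, n, m, dd =>
    match dd.get? (n, m) with
    | some v => (v, dd)
    | none =>
      match dd.get? (m, n) with
      | some v => (v, dd)
      | none =>
        if n = 0 ∨ m = 0 then (0, dd)
        else if n = 1 ∧ m = 1 then (1, dd)
        else
          let r1 := grecA fuel (n - 1) m dd
          let r2 := grecA fuel n (m - 1) r1.2
          (r1.1 + r2.1, r2.2.insert (n, m) (r1.1 + r2.1))

def gridtraveller (n : Int) (m : Int) (d : List (Int × Int × Int)) : Int :=
  let dd := gtDict d
  match dd.get? (n, m) with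
  | some v => v
  | none =>
    match dd.get? (m, n) with
    | some v => v
    | none =>
      if n = 0 ∨ m = 0 then 0
      else if n = 1 ∧ m = 1 then 1
      else
        -- d[(n,m)] = gridtraveller(n-1,m) + gridtraveller(n,m-1): both inner calls run on the
        -- default memo dict (empty at first use), threaded left to right
        let r1 := grecA (n.toNat + m.toNat) (n - 1) m PySem.Dict.empty
        let r2 := grecA (n.toNat + m.toNat) n (m - 1) r1.2
        r1.1 + r2.1

-- ===== PORT B =====
-- v = 1; for i in range(1, n): v = v * (m - 1 + i) // i
def gtBinom (n : Int) (m : Int) : Int :=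
  (PySem.List.pyRange 1 n).foldl (fun v i => PySem.Int.floordiv (v * (m - 1 + i)) i) 1

def gridtraveller_alt (n : Int) (m : Int) (d : List (Int × Int × Int)) : Int :=
  let dd := gtDict d
  match dd.get? (n, m) with
  | some v => v
  | none =>
    match dd.get? (m, n) with
    | some v => v
    | none =>
      if n = 0 ∨ m = 0 then 0
      else if n = 1 ∧ m = 1 then 1
      else gtBinom n m

-- ===== PRECONDITION & SPEC =====
-- Pre_ excludes inputs with a negative dimension on which A's unbounded recursion raises
-- RecursionError; negative dimensions are kept when A answers without recursing (a zero
-- dimension, or the memo dict handed in already holds the key (n,m) or (m,n)).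
def Pre_gridtraveller (n : Int) (m : Int) (d : List (Int × Int × Int)) : Prop :=
  (0 ≤ n ∧ 0 ≤ m) ∨ n = 0 ∨ m = 0 ∨
    (gtDict d).contains (n, m) = true ∨ (gtDict d).contains (m, n) = true
instance (n : Int) (m : Int) (d : List (Int × Int × Int)) : Decidable (Pre_gridtraveller n m d) := by
  unfold Pre_gridtraveller; infer_instance

def pvWitness_gridtraveller : Int × Int × (List (Int × Int × Int)) := (3, 4, [(1, 2, 5)])

def Spec_gridtraveller (n : Int) (m : Int) (d : List (Int × Int × Int)) (out : Int) : Prop := out = gridtraveller_alt n m d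
instance (n : Int) (m : Int) (d : List (Int × Int × Int)) (out : Int) : Decidable (Spec_gridtraveller n m d out) := by unfold Spec_gridtraveller; infer_instance

-- ===== CLAIM (what is proved, stated in full; the proofs are below) =====
def Claim_equal_gridtraveller : Prop := ∀ (n : Int) (m : Int) (d : List (Int × Int × Int)), Dom_gridtraveller n m d → Pre_gridtraveller n m d → Spec_gridtraveller n m d (gridtraveller n m d)

-- ===== LEMMAS AND PROOFS =====

-- the pure grid-path count A's worker computes
def cnt (a b : Int) : Int :=
  if a = 0 ∨ b = 0 then 0 else (((a.toNat - 1) + (b.toNat - 1)).choose (a.toNat - 1) : Int)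

lemma cnt_symm (a b : Int) : cnt b a = cnt a b := by
  unfold cnt
  by_cases h : a = 0 ∨ b = 0
  · rw [if_pos h.symm, if_pos h]
  · rw [if_neg (fun hc => h hc.symm), if_neg h]
    rw [Nat.add_comm (b.toNat - 1) (a.toNat - 1)]
    congr 1
    have hs := Nat.choose_symm (n := (a.toNat - 1) + (b.toNat - 1)) (k := a.toNat - 1)
      (Nat.le_add_right _ _)
    rwa [Nat.add_sub_cancel_left] at hs

lemma cnt_pascal (a b : Int) (ha : 1 ≤ a) (hb : 1 ≤ b) (h : ¬(a = 1 ∧ b = 1)) :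
    cnt (a - 1) b + cnt a (b - 1) = cnt a b := by
  have hx1 : (a - 1).toNat = a.toNat - 1 := by omega
  have hy1 : (b - 1).toNat = b.toNat - 1 := by omega
  unfold cnt
  rw [hx1, hy1]
  by_cases ha1 : a = 1
  · have hb2 : 2 ≤ b := by omega
    rw [if_pos (Or.inl (by omega)), if_neg (by omega), if_neg (by omega)]
    rw [show a.toNat - 1 = 0 by omega]
    simp [Nat.choose_zero_right]
  · by_cases hb1 : b = 1
    · rw [if_neg (by omega), if_pos (Or.inr (by omega)), if_neg (by omega)]
      rw [show b.toNat - 1 = 0 by omega]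
      simp [Nat.choose_self]
    · rw [if_neg (by omega), if_neg (by omega), if_neg (by omega)]
      have hZ : ((a.toNat - 1 - 1 + (b.toNat - 1)).choose (a.toNat - 1 - 1)) +
          ((a.toNat - 1 + (b.toNat - 1 - 1)).choose (a.toNat - 1)) =
          ((a.toNat - 1 + (b.toNat - 1)).choose (a.toNat - 1)) := by
        obtain ⟨p, hp⟩ : ∃ p, a.toNat = p + 2 := ⟨a.toNat - 2, by omega⟩
        obtain ⟨q, hq⟩ : ∃ q, b.toNat = q + 2 := ⟨b.toNat - 2, by omega⟩
        rw [hp, hq]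
        norm_num
        rw [show p + (q + 1) = p + q + 1 by omega, show p + 1 + q = p + q + 1 by omega,
          show p + 1 + (q + 1) = (p + q + 1) + 1 by omega]
        exact (Nat.choose_succ_succ (p + q + 1) p).symm
      exact_mod_cast hZ

-- dict entries written by A's worker always hold the pure count
def PureD (dd : PySem.Dict (Int × Int) Int) : Prop :=
  ∀ a b v, dd.get? (a, b) = some v → v = cnt a b

lemma grecA_eval : ∀ (fuel : Nat) (a b : Int) (dd : PySem.Dict (Int × Int) Int),
    0 ≤ a → 0 ≤ b → a.toNat + b.toNat < fuel → PureD dd →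
    (grecA fuel a b dd).1 = cnt a b ∧ PureD (grecA fuel a b dd).2 := by
  intro fuel
  induction fuel with
  | zero => intro a b dd _ _ hf _; omega
  | succ fu ih =>
    intro a b dd hA hB hf hP
    simp only [grecA]
    cases h1 : dd.get? (a, b) with
    | some v => exact ⟨hP a b v h1, hP⟩
    | none =>
      cases h2 : dd.get? (b, a) with
      | some v => exact ⟨(hP b a v h2).trans (cnt_symm a b), hP⟩
      | none =>
        by_cases hz : a = 0 ∨ b = 0
        · rw [if_pos hz]
          exact ⟨by unfold cnt; rw [if_pos hz], hP⟩
        · rw [if_neg hz]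
          by_cases h11 : a = 1 ∧ b = 1
          · rw [if_pos h11]
            obtain ⟨rfl, rfl⟩ := h11
            exact ⟨by norm_num [cnt], hP⟩
          · rw [if_neg h11]
            dsimp only
            have hn : 1 ≤ a ∧ 1 ≤ b := by omega
            have e1 := ih (a - 1) b dd (by omega) hB (by omega) hP
            have e2 := ih a (b - 1) (grecA fu (a - 1) b dd).2 hA (by omega) (by omega) e1.2
            refine ⟨by rw [e1.1, e2.1]; exact cnt_pascal a b hn.1 hn.2 h11, ?_⟩
            intro x y v hv
            rw [PySem.Dict.get?_insert] at hv
            split at hv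
            · rename_i hxy
              obtain ⟨rfl, rfl⟩ := Prod.ext_iff.mp hxy
              cases hv
              rw [e1.1, e2.1]
              exact cnt_pascal _ _ hn.1 hn.2 h11
            · exact e2.2 x y v hv

lemma binom_loop (m' : Nat) (mI : Int) (hm : mI = (m' : Int) + 1) :
    ∀ j : Nat, (PySem.List.pyRange 1 (1 + (j : Int))).foldl
        (fun v i => PySem.Int.floordiv (v * (mI - 1 + i)) i) 1 = ((m' + j).choose j : Int) := by
  intro j
  induction j with
  | zero =>
    rw [show (1 + ((0 : Nat) : Int)) = 1 by norm_num,
      show PySem.List.pyRange 1 1 = [] from by decide]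
    simp
  | succ j ihj =>
    rw [show (1 + ((j + 1 : Nat) : Int)) = (1 + (j : Nat)) + 1 by push_cast; ring,
      PySem.List.pyRange_one_succ_right (by omega), List.foldl_append, ihj]
    simp only [List.foldl]
    rw [show mI - 1 + (1 + (j : Int)) = ((m' + j + 1 : Nat) : Int) by push_cast [hm]; ring,
      show (1 + (j : Int)) = ((j + 1 : Nat) : Int) by push_cast; ring,
      ← Nat.cast_mul, PySem.Int.floordiv_natCast]
    congr 1
    rw [mul_comm, Nat.add_one_mul_choose_eq]
    exact Nat.mul_div_cancel _ (by omega)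

lemma gtBinom_eq (n m : Int) (hn : 1 ≤ n) (hm : 1 ≤ m) : gtBinom n m = cnt n m := by
  unfold gtBinom
  rw [show n = 1 + ((n.toNat - 1 : Nat) : Int) by omega]
  rw [binom_loop (m.toNat - 1) m (by omega)]
  unfold cnt
  rw [if_neg (by omega)]
  congr 2
  · omega
  · omega

-- ===== VERDICT (by name: the statement is the Claim_ definition above) =====
theorem gridtraveller_spec : Claim_equal_gridtraveller := by
  intro n m d _hdom hpre
  unfold Spec_gridtraveller gridtraveller gridtraveller_alt
  cases h1 : (gtDict d).get? (n, m) with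
  | some v => simp [h1]
  | none =>
    cases h2 : (gtDict d).get? (m, n) with
    | some v => simp [h1, h2]
    | none =>
      simp only [h1, h2]
      by_cases hz : n = 0 ∨ m = 0
      · simp [hz]
      · rw [if_neg hz, if_neg hz]
        by_cases h11 : n = 1 ∧ m = 1
        · simp [h11]
        · rw [if_neg h11, if_neg h11]
          -- Pre_ leaves only 0 ≤ n ∧ 0 ≤ m: lookups missed, no zero dimension
          have hnn : 1 ≤ n ∧ 1 ≤ m := by
            rcases hpre with h | h | h | h | h
            · omega
            · exact absurd (Or.inl h) hz
            · exact absurd (Or.inr h) hz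
            · rw [PySem.Dict.get?_eq_none_iff_contains] at h1; simp [h1] at h
            · rw [PySem.Dict.get?_eq_none_iff_contains] at h2; simp [h2] at h
          obtain ⟨hn, hm⟩ := hnn
          have hf : (n - 1).toNat + m.toNat < n.toNat + m.toNat := by omega
          have hf2 : n.toNat + (m - 1).toNat < n.toNat + m.toNat := by omega
          have e1 := grecA_eval (n.toNat + m.toNat) (n - 1) m PySem.Dict.empty
            (by omega) (by omega) hf (by intro a b v hv; simp [PySem.Dict.get?_empty] at hv)
          have e2 := grecA_eval (n.toNat + m.toNat) n (m - 1)
            (grecA (n.toNat + m.toNat) (n - 1) m PySem.Dict.empty).2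
            (by omega) (by omega) hf2 e1.2
          rw [gtBinom_eq n m hn hm, e1.1, e2.1, cnt_pascal n m hn hm h11]
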